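-- pv_equiv track=rewrite | github.com/yogeshjadhav22/HackerRank_Code | Cats_and_a_Mouse.py | catAndMouse
-- ===== SOURCE A (Python) =====
-- def catAndMouse(x, y, z):
--     cnt=0
--     cnt1=0
--     if x>z:
--         for i in range(x,z,-1):
--             cnt=cnt+1
--     else:
--         for i in range(x,z):
--             cnt=cnt+1
--
--     if y>z:
--         for i in range(y,z,-1):
--             cnt1=cnt1+1
--     else:
--         for i in range(y,z):
--             cnt1=cnt1+1
--
--     if(cnt<cnt1):
--           return("Cat A")
--     elif(cnt>cnt1):
--           return("Cat B")
--     else: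
--           return("Mouse C")
-- ===== SOURCE B (Python) =====
-- def catAndMouse(x, y, z):
--     a = abs(x - z)
--     b = abs(y - z)
--     return "Cat A" if a < b else "Cat B" if a > b else "Mouse C"
-- ===== Notes on version B (the rewrite author's own statement) =====
-- stated objective: faster
-- what changed: Replaced the two counting loops over range(...) by direct distance computation with abs() and a conditional-expression comparison.
import Mathlib
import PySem

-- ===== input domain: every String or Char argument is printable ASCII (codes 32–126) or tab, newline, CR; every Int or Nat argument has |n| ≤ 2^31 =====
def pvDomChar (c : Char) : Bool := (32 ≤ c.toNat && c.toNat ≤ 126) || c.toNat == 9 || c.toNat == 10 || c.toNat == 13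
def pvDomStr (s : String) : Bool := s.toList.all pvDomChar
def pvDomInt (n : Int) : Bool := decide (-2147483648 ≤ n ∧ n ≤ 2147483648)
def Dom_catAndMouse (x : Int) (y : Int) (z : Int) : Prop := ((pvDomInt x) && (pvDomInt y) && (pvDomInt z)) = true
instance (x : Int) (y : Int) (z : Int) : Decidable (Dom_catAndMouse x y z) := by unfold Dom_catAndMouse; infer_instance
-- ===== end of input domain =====

-- ===== PORT A =====
-- B replaces A's two counting loops by direct abs() distances; O(1) instead of O(|x-z|+|y-z|).
def catAndMouse (x : Int) (y : Int) (z : Int) : String :=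
  let cnt : Int :=
    if x > z then (PySem.List.pyRange x z (-1)).foldl (fun c _ => c + 1) 0
    else (PySem.List.pyRange x z 1).foldl (fun c _ => c + 1) 0
  let cnt1 : Int :=
    if y > z then (PySem.List.pyRange y z (-1)).foldl (fun c _ => c + 1) 0
    else (PySem.List.pyRange y z 1).foldl (fun c _ => c + 1) 0
  if cnt < cnt1 then "Cat A"
  else if cnt > cnt1 then "Cat B"
  else "Mouse C"

-- ===== PORT B =====
def catAndMouse_alt (x : Int) (y : Int) (z : Int) : String :=
  let a : Int := |x - z|
  let b : Int := |y - z|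
  if a < b then "Cat A" else if a > b then "Cat B" else "Mouse C"

-- ===== PRECONDITION & SPEC =====
def Spec_catAndMouse (x : Int) (y : Int) (z : Int) (out : String) : Prop := out = catAndMouse_alt x y z
instance (x : Int) (y : Int) (z : Int) (out : String) : Decidable (Spec_catAndMouse x y z out) := by unfold Spec_catAndMouse; infer_instance

-- ===== CLAIM (what is proved, stated in full; the proofs are below) =====
def Claim_equal_catAndMouse : Prop := ∀ (x : Int) (y : Int) (z : Int), Dom_catAndMouse x y z → Spec_catAndMouse x y z (catAndMouse x y z)

-- ===== LEMMAS AND PROOFS =====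

-- ===== VERDICT (by name: the statement is the Claim_ definition above) =====
theorem count_eq_length (l : List Int) : l.foldl (fun c _ => c + (1:Int)) 0 = l.length := by
  have h : ∀ (init : Int), l.foldl (fun c _ => c + (1:Int)) init = init + l.length := by
    induction l with
    | nil => intro init; simp
    | cons a t ih => intro init; simp [List.foldl, ih]; omega
  simpa using h 0

theorem dist_eq (a z : Int) :
    (if a > z then (PySem.List.pyRange a z (-1)).foldl (fun c _ => c + (1:Int)) 0
     else (PySem.List.pyRange a z 1).foldl (fun c _ => c + 1) 0) = |a - z| := by
  split_ifs with h
  · rw [count_eq_length, PySem.List.length_pyRange_neg_one, abs_of_pos (by omega : (0:Int) < a - z)]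
    omega
  · rw [count_eq_length, PySem.List.length_pyRange_one, abs_of_nonpos (by omega : a - z ≤ 0)]
    omega

theorem catAndMouse_spec : Claim_equal_catAndMouse := by
  intro x y z _
  show catAndMouse x y z = catAndMouse_alt x y z
  unfold catAndMouse catAndMouse_alt
  rw [dist_eq, dist_eq]
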